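-- pv_equiv track=rewrite | github.com/bibleman-stan/readers-gnt | scripts/scan_elided_parallels.py | _has_mens_and_des
-- ===== SOURCE A (Python) =====
-- _GRAVE_TO_ACUTE = str.maketrans({
--     "ὰ": "ά", "ὲ": "έ", "ὴ": "ή", "ὶ": "ί",
--     "ὸ": "ό", "ὺ": "ύ", "ὼ": "ώ",
--     "ἂ": "ἄ", "ἒ": "ἔ", "ἢ": "ἤ", "ἲ": "ἴ",
--     "ὂ": "ὄ", "ὒ": "ὔ", "ὢ": "ὤ",
--     "ἃ": "ἅ", "ἓ": "ἕ", "ἣ": "ἥ", "ἳ": "ἵ",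
--     "ὃ": "ὅ", "ὓ": "ὕ", "ὣ": "ὥ",
-- })
--
-- def _normalize_accent(word: str) -> str:
--     return word.translate(_GRAVE_TO_ACUTE)
--
-- def _token_normal(word: dict) -> str:
--     return _normalize_accent(word["cleaned"])
--
-- def _has_mens_and_des(pair_idx: dict[str, list[int]], words: list[dict]) -> bool:
--     """True iff this line contains a μέν...δέ pair *in order* (μέν before δέ).
--
--     Discourse-level δέ ("νῦν δέ" / "ἐγὼ δέ" at the start of a line) followed
--     later by a μέν is NOT a within-line pair — the μέν is pointing to a δέ
--     on the next line. We require μέν index < δέ index.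
--     """
--     if "men_de" not in pair_idx:
--         return False
--     cls_idxs = pair_idx["men_de"]
--     men_positions = [i for i in cls_idxs if _token_normal(words[i]) == "μέν"]
--     de_positions = [i for i in cls_idxs if _token_normal(words[i]) == "δέ"]
--     if not men_positions or not de_positions:
--         return False
--     return min(men_positions) < max(de_positions)
-- ===== SOURCE B (Python) =====
-- _GRAVE_TO_ACUTE = str.maketrans({
--     "ὰ": "ά", "ὲ": "έ", "ὴ": "ή", "ὶ": "ί",
--     "ὸ": "ό", "ὺ": "ύ", "ὼ": "ώ",
--     "ἂ": "ἄ", "ἒ": "ἔ", "ἢ": "ἤ", "ἲ": "ἴ",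
--     "ὂ": "ὄ", "ὒ": "ὔ", "ὢ": "ὤ",
--     "ἃ": "ἅ", "ἓ": "ἕ", "ἣ": "ἥ", "ἳ": "ἵ",
--     "ὃ": "ὅ", "ὓ": "ὕ", "ὣ": "ὥ",
-- })
--
--
-- def _has_mens_and_des(pair_idx: dict, words: list) -> bool:
--     """Single fused pass: running min of the μέν indices and running max of the
--     δέ indices, instead of two list comprehensions plus min() and max()."""
--     idxs = pair_idx.get("men_de")
--     if idxs is None:
--         return False
--     men_min = None
--     de_max = None
--     for i in idxs:
--         tok = words[i]["cleaned"].translate(_GRAVE_TO_ACUTE)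
--         if tok == "μέν":
--             if men_min is None or i < men_min:
--                 men_min = i
--         if tok == "δέ":
--             if de_max is None or de_max < i:
--                 de_max = i
--     return men_min is not None and de_max is not None and men_min < de_max
-- ===== Notes on version B (the rewrite author's own statement) =====
-- stated objective: alternative
-- what changed: Replaced the two list comprehensions over cls_idxs plus the separate min() and max() calls by one fused pass that maintains a running minimum of the μέν indices and a running maximum of the δέ indices.
import Mathlib
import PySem

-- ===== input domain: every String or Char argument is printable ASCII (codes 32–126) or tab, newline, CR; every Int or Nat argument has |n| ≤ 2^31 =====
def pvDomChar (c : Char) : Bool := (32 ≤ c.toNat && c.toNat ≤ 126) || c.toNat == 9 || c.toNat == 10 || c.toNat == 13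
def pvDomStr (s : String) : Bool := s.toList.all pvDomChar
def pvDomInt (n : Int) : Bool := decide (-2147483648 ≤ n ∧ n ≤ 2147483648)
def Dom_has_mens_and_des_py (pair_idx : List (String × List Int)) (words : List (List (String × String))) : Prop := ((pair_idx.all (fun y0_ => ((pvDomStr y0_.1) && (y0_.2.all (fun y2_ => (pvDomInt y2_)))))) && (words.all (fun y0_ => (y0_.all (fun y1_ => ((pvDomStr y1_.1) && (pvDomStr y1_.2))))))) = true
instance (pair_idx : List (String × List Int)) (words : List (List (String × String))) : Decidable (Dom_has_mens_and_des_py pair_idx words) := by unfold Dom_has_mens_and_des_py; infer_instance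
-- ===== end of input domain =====

-- B fuses A's two list comprehensions plus min()/max() into one pass keeping a running
-- min of the μέν indices and a running max of the δέ indices (objective: alternative).

-- ===== PORT A =====
-- the _GRAVE_TO_ACUTE table of str.maketrans, as a char→char association list
def pvGraveToAcute : List (Char × Char) :=
  [('ὰ', 'ά'), ('ὲ', 'έ'), ('ὴ', 'ή'), ('ὶ', 'ί'),
   ('ὸ', 'ό'), ('ὺ', 'ύ'), ('ὼ', 'ώ'),
   ('ἂ', 'ἄ'), ('ἒ', 'ἔ'), ('ἢ', 'ἤ'), ('ἲ', 'ἴ'),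
   ('ὂ', 'ὄ'), ('ὒ', 'ὔ'), ('ὢ', 'ὤ'),
   ('ἃ', 'ἅ'), ('ἓ', 'ἕ'), ('ἣ', 'ἥ'), ('ἳ', 'ἵ'),
   ('ὃ', 'ὅ'), ('ὓ', 'ὕ'), ('ὣ', 'ὥ')]

-- _normalize_accent: str.translate with a 1-char→1-char map is exact as a per-char map
def pvNormalizeAccent (w : String) : String :=
  String.ofList (w.toList.map (fun c => ((pvGraveToAcute.lookup c).getD c)))

-- _token_normal(words[i]); none where Python raises IndexError/KeyError (excluded by Pre_)
def pvTokenNormal (words : List (List (String × String))) (i : Int) : Option String :=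
  (PySem.List.pyGet? words i).bind
    (fun w => ((PySem.Dict.mk w).get? "cleaned").map pvNormalizeAccent)

def has_mens_and_des_py (pair_idx : List (String × List Int)) (words : List (List (String × String))) : Bool :=
  match (PySem.Dict.mk pair_idx).get? "men_de" with
  | none => false
  | some cls_idxs =>
    let men_positions := cls_idxs.filter (fun i => pvTokenNormal words i == some "μέν")
    let de_positions := cls_idxs.filter (fun i => pvTokenNormal words i == some "δέ")
    if men_positions.isEmpty || de_positions.isEmpty then false
    else
      match PySem.List.min? men_positions (fun x => x), PySem.List.max? de_positions (fun x => x) with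
      | some m, some M => decide (m < M)
      | _, _ => false

-- ===== PORT B =====
-- B's own copy of the translation table and token normalization (same-module helpers of Source B)
def pvGraveToAcuteB : List (Char × Char) :=
  [('ὰ', 'ά'), ('ὲ', 'έ'), ('ὴ', 'ή'), ('ὶ', 'ί'),
   ('ὸ', 'ό'), ('ὺ', 'ύ'), ('ὼ', 'ώ'),
   ('ἂ', 'ἄ'), ('ἒ', 'ἔ'), ('ἢ', 'ἤ'), ('ἲ', 'ἴ'),
   ('ὂ', 'ὄ'), ('ὒ', 'ὔ'), ('ὢ', 'ὤ'),
   ('ἃ', 'ἅ'), ('ἓ', 'ἕ'), ('ἣ', 'ἥ'), ('ἳ', 'ἵ'),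
   ('ὃ', 'ὅ'), ('ὓ', 'ὕ'), ('ὣ', 'ὥ')]

-- words[i]["cleaned"].translate(_GRAVE_TO_ACUTE); none where Python raises (excluded by Pre_)
def pvTokenB (words : List (List (String × String))) (i : Int) : Option String :=
  (PySem.List.pyGet? words i).bind
    (fun w => ((PySem.Dict.mk w).get? "cleaned").map
      (fun s => String.ofList (s.toList.map (fun c => ((pvGraveToAcuteB.lookup c).getD c)))))
-- one step of B's fused loop: update running min of μέν indices / running max of δέ indices
def pvFuseStep (words : List (List (String × String))) (st : Option Int × Option Int) (i : Int) :
    Option Int × Option Int :=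
  let tok := pvTokenB words i
  let men_min := if tok == some "μέν" then
      (match st.1 with
       | none => some i
       | some m => if i < m then some i else some m)
    else st.1
  let de_max := if tok == some "δέ" then
      (match st.2 with
       | none => some i
       | some d => if d < i then some i else some d)
    else st.2
  (men_min, de_max)

def has_mens_and_des_py_alt (pair_idx : List (String × List Int)) (words : List (List (String × String))) : Bool :=
  (((PySem.Dict.mk pair_idx).get? "men_de").elim false (fun idxs =>
    let st := idxs.foldl (pvFuseStep words) (none, none)
    st.1.elim false (fun men_min => st.2.elim false (fun de_max => decide (men_min < de_max)))))

-- ===== PRECONDITION & SPEC =====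
-- Pre_ excludes exactly the inputs where A raises: an index in pair_idx["men_de"] out of
-- range of words (IndexError) or a word dict without the key "cleaned" (KeyError).
def Pre_has_mens_and_des_py (pair_idx : List (String × List Int)) (words : List (List (String × String))) : Prop :=
  ∀ i ∈ (((PySem.Dict.mk pair_idx).get? "men_de").getD []),
    (PySem.List.pyGet? words i).any (fun w => (PySem.Dict.mk w).contains "cleaned") = true
instance (pair_idx : List (String × List Int)) (words : List (List (String × String))) : Decidable (Pre_has_mens_and_des_py pair_idx words) := by unfold Pre_has_mens_and_des_py; infer_instance

def pvWitness_has_mens_and_des_py : (List (String × List Int)) × (List (List (String × String))) :=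
  ([("men_de", [0, 1])], [[("cleaned", "a")], [("cleaned", "b")]])

def Spec_has_mens_and_des_py (pair_idx : List (String × List Int)) (words : List (List (String × String))) (out : Bool) : Prop := out = has_mens_and_des_py_alt pair_idx words
instance (pair_idx : List (String × List Int)) (words : List (List (String × String))) (out : Bool) : Decidable (Spec_has_mens_and_des_py pair_idx words out) := by unfold Spec_has_mens_and_des_py; infer_instance

-- ===== CLAIM (what is proved, stated in full; the proofs are below) =====
def Claim_equal_has_mens_and_des_py : Prop := ∀ (pair_idx : List (String × List Int)) (words : List (List (String × String))), Dom_has_mens_and_des_py pair_idx words → Pre_has_mens_and_des_py pair_idx words → Spec_has_mens_and_des_py pair_idx words (has_mens_and_des_py pair_idx words)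

-- ===== LEMMAS AND PROOFS =====

-- running-min / running-max steps in isolation
def pvMinStep (a : Option Int) (i : Int) : Option Int :=
  match a with
  | none => some i
  | some m => if i < m then some i else some m

def pvMaxStep (b : Option Int) (i : Int) : Option Int :=
  match b with
  | none => some i
  | some d => if d < i then some i else some d

theorem pvFuse_split (words : List (List (String × String))) (l : List Int)
    (a b : Option Int) :
    l.foldl (pvFuseStep words) (a, b) =
      ((l.filter (fun i => pvTokenB words i == some "μέν")).foldl pvMinStep a,
       (l.filter (fun i => pvTokenB words i == some "δέ")).foldl pvMaxStep b) := by
  induction l generalizing a b with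
  | nil => simp
  | cons i t ih =>
    simp only [List.foldl_cons, List.filter_cons]
    rw [ih]
    by_cases hm : (pvTokenB words i == some "μέν") = true <;>
      by_cases hd : (pvTokenB words i == some "δέ") = true <;>
        simp [pvFuseStep, pvMinStep, pvMaxStep, hm, hd]

theorem pvMinStep_some (m i : Int) : pvMinStep (some m) i = some (min m i) := by
  simp only [pvMinStep]
  split_ifs with h <;> congr 1 <;> omega

theorem pvMaxStep_some (d i : Int) : pvMaxStep (some d) i = some (max d i) := by
  simp only [pvMaxStep]
  split_ifs with h <;> congr 1 <;> omega

theorem pvFoldl_minStep_some (t : List Int) (m : Int) :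
    t.foldl pvMinStep (some m) = some (t.foldl min m) := by
  induction t generalizing m with
  | nil => rfl
  | cons i t ih => simp [pvMinStep_some, ih]

theorem pvFoldl_maxStep_some (t : List Int) (d : Int) :
    t.foldl pvMaxStep (some d) = some (t.foldl max d) := by
  induction t generalizing d with
  | nil => rfl
  | cons i t ih => simp [pvMaxStep_some, ih]

theorem pvFoldl_minStep_eq_min? (l : List Int) :
    l.foldl pvMinStep none = PySem.List.min? l (fun x => x) := by
  cases l with
  | nil => simp [PySem.List.min?]
  | cons x t =>
    rw [PySem.List.min?_id_cons]
    simpa [pvMinStep] using pvFoldl_minStep_some t x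

theorem pvFoldl_maxStep_eq_max? (l : List Int) :
    l.foldl pvMaxStep none = PySem.List.max? l (fun x => x) := by
  cases l with
  | nil => simp [PySem.List.max?]
  | cons x t =>
    rw [PySem.List.max?_id_cons]
    simpa [pvMaxStep] using pvFoldl_maxStep_some t x

-- ===== VERDICT (by name: the statement is the Claim_ definition above) =====
theorem has_mens_and_des_py_spec : Claim_equal_has_mens_and_des_py := by
  intro pair_idx words _ _
  unfold Spec_has_mens_and_des_py has_mens_and_des_py has_mens_and_des_py_alt
  cases h : (PySem.Dict.mk pair_idx).get? "men_de" with
  | none => rfl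
  | some cls_idxs =>
    simp only [Option.elim]
    rw [pvFuse_split, pvFoldl_minStep_eq_min?, pvFoldl_maxStep_eq_max?]
    have htok : pvTokenB words = pvTokenNormal words := rfl
    rw [htok]
    set men := cls_idxs.filter (fun i => pvTokenNormal words i == some "μέν") with hmen
    set de := cls_idxs.filter (fun i => pvTokenNormal words i == some "δέ") with hde
    cases hm : PySem.List.min? men (fun x => x) with
    | none =>
      have : men = [] := (PySem.List.min?_eq_none_iff men (fun x => x)).mp hm
      simp [this]
    | some m =>
      cases hM : PySem.List.max? de (fun x => x) with
      | none =>
        have : de = [] := (PySem.List.max?_eq_none_iff de (fun x => x)).mp hM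
        simp [this]
      | some M =>
        have hmne : men ≠ [] := by
          intro h0; rw [h0] at hm; simp [PySem.List.min?] at hm
        have hdne : de ≠ [] := by
          intro h0; rw [h0] at hM; simp [PySem.List.max?] at hM
        simp [List.isEmpty_iff, hmne, hdne]
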